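-- pv_equiv track=rewrite | github.com/alerzaca/MIDI_steganography | src/text_functions.py | ascii_to_pairs
-- ===== SOURCE A (Python) =====
-- def ascii_to_base9(text):
--     base9_list = []
--
--     for char in text:
--         ascii_value = ord(char)
--         base9_value = ""
--
--         while ascii_value > 0:
--             remainder = ascii_value % 9
--             base9_value = str(remainder) + base9_value
--             ascii_value //= 9
--
--         base9_list.append(base9_value.zfill(3))
--
--     return ''.join(base9_list)
--
-- def ascii_to_pairs(text):
--     base9_value = ascii_to_base9(text)
--
--     permutation_list = [int(digit) for digit in base9_value]
--
--     pairs = []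
--     for perm_number in permutation_list:
--         pair = [perm_number // 3, perm_number % 3]
--         pairs.append(pair)
--
--     return pairs
-- ===== SOURCE B (Python) =====
-- def ascii_to_pairs(text):
--     # Per character: generate base-3 digits directly with divmod, pad to an even
--     # length of at least 6, and emit consecutive [hi, lo] pairs. No base-9 string step.
--     pairs = []
--     for ch in text:
--         v = ord(ch)
--         digits = []
--         while v > 0:
--             v, r = divmod(v, 3)
--             digits.append(r)
--         while len(digits) < 6 or len(digits) % 2 == 1:
--             digits.append(0)
--         digits = digits[::-1]
--         while digits:
--             pairs.append([digits[0], digits[1]])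
--             digits = digits[2:]
--     return pairs
-- ===== Notes on version B (the rewrite author's own statement) =====
-- stated objective: simpler
-- what changed: B drops the base-9 string round-trip entirely: per character it generates base-3 digits directly with repeated divmod, pads the digit list to an even length of at least 6, and emits consecutive [hi,lo] pairs, instead of building a zfilled base-9 string, joining, re-parsing each character back to an int and splitting it with //3 and %3.
import Mathlib
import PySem

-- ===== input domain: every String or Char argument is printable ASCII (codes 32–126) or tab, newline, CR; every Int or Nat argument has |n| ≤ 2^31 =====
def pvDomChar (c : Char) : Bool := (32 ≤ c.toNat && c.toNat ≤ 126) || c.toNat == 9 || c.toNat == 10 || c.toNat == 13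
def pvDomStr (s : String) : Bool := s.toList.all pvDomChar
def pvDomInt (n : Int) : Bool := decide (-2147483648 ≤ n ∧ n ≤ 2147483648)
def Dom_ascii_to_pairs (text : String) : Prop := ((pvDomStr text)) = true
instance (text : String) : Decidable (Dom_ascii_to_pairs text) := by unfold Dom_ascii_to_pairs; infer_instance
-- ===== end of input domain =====

-- B replaces A's base-9 string round-trip by direct base-3 digit generation per character
-- (divmod, pad to even length ≥ 6, emit consecutive pairs); simpler, same cost, same values.

-- ===== PORT A =====
-- the Python 'while ascii_value > 0' loop; the Nat fuel only makes the same computation total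
-- (fuel = v.toNat + 1 always suffices); strings are carried as List Char (exact: ASCII digits only)
def pvBase9Loop : Nat → Int → List Char → List Char
  | 0, _, acc => acc
  | fuel + 1, v, acc =>
    if v > 0 then
      pvBase9Loop fuel (PySem.Int.floordiv v 9) (PySem.Int.toChars (PySem.Int.mod v 9) ++ acc)
    else acc

def ascii_to_base9 (text : String) : List Char :=
  PySem.Chars.join []
    (text.toList.foldl
      (fun base9_list c =>
        base9_list ++ [PySem.Chars.zfill (pvBase9Loop (c.toNat + 1) (c.toNat : Int) []) 3]) [])

def ascii_to_pairs (text : String) : List (List Int) :=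
  let base9_value := ascii_to_base9 text
  -- int(digit): exact for the '0'..'8' characters this string consists of
  let permutation_list := base9_value.map (fun c => ((c.toNat : Int) - 48))
  permutation_list.foldl
    (fun pairs perm_number =>
      pairs ++ [[PySem.Int.floordiv perm_number 3, PySem.Int.mod perm_number 3]]) []

-- ===== PORT B =====
-- 'while v > 0: v, r = divmod(v, 3); digits.append(r)'; fuel = v.toNat + 1 always suffices
def pvDigits3 : Nat → Int → List Int → List Int
  | 0, _, ds => ds
  | fuel + 1, v, ds =>
    if v > 0 then pvDigits3 fuel (PySem.Int.floordiv v 3) (ds ++ [PySem.Int.mod v 3]) else ds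

-- 'while len(digits) < 6 or len(digits) % 2 == 1: digits.append(0)'; at most 6 appends happen,
-- so fuel 8 only makes the loop total
def pvPad : Nat → List Int → List Int
  | 0, ds => ds
  | fuel + 1, ds =>
    if ds.length < 6 || ds.length % 2 == 1 then pvPad fuel (ds ++ [0]) else ds

-- 'while digits: pairs.append([digits[0], digits[1]]); digits = digits[2:]'
-- (a singleton list would be an IndexError in Python; the list is always of even length)
def pvTake2 : List Int → List (List Int) → List (List Int)
  | a :: b :: rest, pairs => pvTake2 rest (pairs ++ [[a, b]])
  | _, pairs => pairs

def ascii_to_pairs_alt (text : String) : List (List Int) :=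
  text.toList.foldl
    (fun pairs c =>
      -- digits[::-1] is List.reverse (PySem.List.slice?_none_none_neg_one)
      pvTake2 ((pvPad 8 (pvDigits3 (c.toNat + 1) (c.toNat : Int) [])).reverse) pairs) []

-- ===== PRECONDITION & SPEC =====
def Spec_ascii_to_pairs (text : String) (out : List (List Int)) : Prop := out = ascii_to_pairs_alt text
instance (text : String) (out : List (List Int)) : Decidable (Spec_ascii_to_pairs text out) := by unfold Spec_ascii_to_pairs; infer_instance

-- ===== CLAIM (what is proved, stated in full; the proofs are below) =====
def Claim_equal_ascii_to_pairs : Prop := ∀ (text : String), Dom_ascii_to_pairs text → Spec_ascii_to_pairs text (ascii_to_pairs text)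

-- ===== LEMMAS AND PROOFS =====

-- A's contribution of one character, as a function of its code
def perA (n : Nat) : List (List Int) :=
  ((PySem.Chars.zfill (pvBase9Loop (n + 1) (n : Int) []) 3).map
      (fun c => ((c.toNat : Int) - 48))).map
    (fun m => [PySem.Int.floordiv m 3, PySem.Int.mod m 3])

-- B's contribution of one character
def perB (n : Nat) : List (List Int) :=
  pvTake2 ((pvPad 8 (pvDigits3 (n + 1) (n : Int) [])).reverse) []

theorem foldl_snoc_eq_map {α β : Type} (f : α → β) :
    ∀ (xs : List α) (init : List β),
      xs.foldl (fun l c => l ++ [f c]) init = init ++ xs.map f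
  | [], init => by simp
  | x :: xs, init => by
    simp [List.foldl_cons, foldl_snoc_eq_map f xs]

theorem pvTake2_acc : ∀ (ds : List Int) (ps : List (List Int)),
    pvTake2 ds ps = ps ++ pvTake2 ds []
  | [], ps => by simp [pvTake2]
  | [a], ps => by simp [pvTake2]
  | a :: b :: rest, ps => by
    rw [show pvTake2 (a :: b :: rest) ps = pvTake2 rest (ps ++ [[a, b]]) from rfl,
        show pvTake2 (a :: b :: rest) [] = pvTake2 rest ([] ++ [[a, b]]) from rfl,
        pvTake2_acc rest (ps ++ [[a, b]]), pvTake2_acc rest ([] ++ [[a, b]])]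
    simp

theorem join_nil_eq_flatten : ∀ (l : List (List Char)),
    PySem.Chars.join [] l = l.flatten
  | [] => by simp [PySem.Chars.join_nil]
  | [a] => by simp [PySem.Chars.join_singleton]
  | a :: b :: rest => by
    simp [PySem.Chars.join_cons_cons, join_nil_eq_flatten (b :: rest)]

set_option maxRecDepth 8000 in
theorem perChar_eq : ∀ n : Nat, n < 127 → perA n = perB n := by decide

theorem ascii_to_pairs_eq_flatten (text : String) :
    ascii_to_pairs text = (text.toList.map (fun c => perA c.toNat)).flatten := by
  unfold ascii_to_pairs ascii_to_base9
  rw [foldl_snoc_eq_map, join_nil_eq_flatten, foldl_snoc_eq_map]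
  simp [perA, List.map_flatten, List.map_map, Function.comp_def]

theorem ascii_to_pairs_alt_eq_flatten (text : String) :
    ascii_to_pairs_alt text = (text.toList.map (fun c => perB c.toNat)).flatten := by
  unfold ascii_to_pairs_alt
  have h : ∀ (cs : List Char) (init : List (List Int)),
      cs.foldl (fun pairs c =>
        pvTake2 ((pvPad 8 (pvDigits3 (c.toNat + 1) (c.toNat : Int) [])).reverse) pairs) init
        = init ++ (cs.map (fun c => perB c.toNat)).flatten := by
    intro cs
    induction cs with
    | nil => intro init; simp
    | cons c cs ih =>
      intro init
      rw [List.foldl_cons, ih, pvTake2_acc]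
      simp only [perB, List.map_cons, List.flatten_cons, List.append_assoc]
  simpa using h text.toList []

-- ===== VERDICT (by name: the statement is the Claim_ definition above) =====
theorem ascii_to_pairs_spec : Claim_equal_ascii_to_pairs := by
  intro text hdom
  unfold Spec_ascii_to_pairs
  rw [ascii_to_pairs_eq_flatten, ascii_to_pairs_alt_eq_flatten]
  congr 1
  apply List.map_congr_left
  intro c hc
  have hd : pvDomChar c = true := by
    have := (List.all_eq_true.mp hdom) c hc
    simpa using this
  have hlt : c.toNat < 127 := by
    simp [pvDomChar] at hd
    omega
  exact perChar_eq c.toNat hlt
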